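-- pv_equiv track=rewrite | github.com/kewuaa/desktop_pet | music/qq/qq.py | ye
-- ===== SOURCE A (Python) =====
-- from itertools import zip_longest
--
-- def ye(e, t):
--     nn = []
--     (n := list(str(e))).reverse()
--     (a := list(str(t))).reverse()
--     i = 0
--     for nu, au in zip_longest(n, a, fillvalue=0):
--         l = round(int(nu)) + round(int(au)) + i
--         nn.append(str(l % 10))
--         i = 1 if l >= 10 else 0
--     i == 1 and nn.append('1')
--     nn.reverse()
--     return ''.join(nn)
-- ===== SOURCE B (Python) =====
-- def ye(e, t):
--     va = 0
--     for c in str(e):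
--         va = va * 10 + int(c)
--     vb = 0
--     for c in str(t):
--         vb = vb * 10 + int(c)
--     return str(va + vb)
-- ===== Notes on version B (the rewrite author's own statement) =====
-- stated objective: simpler
-- what changed: B parses each operand's decimal string with a per-character Horner loop and returns str of one native addition, replacing A's reversed zip_longest digit loop with manual carry propagation.
import Mathlib
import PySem

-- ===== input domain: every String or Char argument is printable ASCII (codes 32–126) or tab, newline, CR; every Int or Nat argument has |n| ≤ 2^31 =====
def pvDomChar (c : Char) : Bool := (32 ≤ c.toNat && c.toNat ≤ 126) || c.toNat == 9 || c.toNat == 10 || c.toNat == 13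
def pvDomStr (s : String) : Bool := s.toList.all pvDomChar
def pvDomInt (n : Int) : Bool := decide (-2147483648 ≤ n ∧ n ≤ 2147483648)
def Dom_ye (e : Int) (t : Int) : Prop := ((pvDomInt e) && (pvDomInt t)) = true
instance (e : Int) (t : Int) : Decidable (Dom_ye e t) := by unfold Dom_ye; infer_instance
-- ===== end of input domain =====

-- B swaps A's reversed zip_longest digit loop with manual carry for two per-character Horner
-- parse loops and one native addition (objective: simpler).

-- ===== PORT A =====
-- int(c) for a single character; Python raises ValueError on a non-digit (only reachable for a
-- negative operand, whose str starts with '-'): excluded by Pre_ye, so the default 0 is never used there.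
def pyIntChar (c : Char) : Int := (PySem.Int.ofChars? [c]).getD 0

-- the `for nu, au in zip_longest(n, a, fillvalue=0)` loop: state = (nn, i)
def yeLoop : List Char → List Char → Int → List String → List String × Int
  | [], [], i, nn => (nn, i)
  | nu :: n, au :: a, i, nn =>
      let l := pyIntChar nu + pyIntChar au + i
      yeLoop n a (if l ≥ 10 then 1 else 0) (nn ++ [PySem.Int.toStr (PySem.Int.mod l 10)])
  | nu :: n, [], i, nn =>
      let l := pyIntChar nu + 0 + i
      yeLoop n [] (if l ≥ 10 then 1 else 0) (nn ++ [PySem.Int.toStr (PySem.Int.mod l 10)])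
  | [], au :: a, i, nn =>
      let l := 0 + pyIntChar au + i
      yeLoop [] a (if l ≥ 10 then 1 else 0) (nn ++ [PySem.Int.toStr (PySem.Int.mod l 10)])

def ye (e : Int) (t : Int) : String :=
  let n := (PySem.Int.toStr e).toList.reverse
  let a := (PySem.Int.toStr t).toList.reverse
  let r := yeLoop n a 0 []
  let nn := if r.2 == 1 then r.1 ++ ["1"] else r.1
  PySem.Str.join "" nn.reverse

-- ===== PORT B =====
-- `for c in str(x): v = v * 10 + int(c)`
def hornerChars : List Char → Int → Int
  | [], v => v
  | c :: cs, v => hornerChars cs (v * 10 + pyIntChar c)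

def ye_alt (e : Int) (t : Int) : String :=
  PySem.Int.toStr (hornerChars (PySem.Int.toStr e).toList 0 + hornerChars (PySem.Int.toStr t).toList 0)

-- ===== PRECONDITION & SPEC =====
-- A raises ValueError on any negative operand (str(e) starts with '-' and int('-') raises); Pre_ excludes exactly those.
def Pre_ye (e : Int) (t : Int) : Prop := 0 ≤ e ∧ 0 ≤ t
instance (e : Int) (t : Int) : Decidable (Pre_ye e t) := by unfold Pre_ye; infer_instance
def pvWitness_ye : Int × Int := (12, 995)

def Spec_ye (e : Int) (t : Int) (out : String) : Prop := out = ye_alt e t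
instance (e : Int) (t : Int) (out : String) : Decidable (Spec_ye e t out) := by unfold Spec_ye; infer_instance

-- ===== CLAIM (what is proved, stated in full; the proofs are below) =====
def Claim_equal_ye : Prop := ∀ (e : Int) (t : Int), Dom_ye e t → Pre_ye e t → Spec_ye e t (ye e t)

-- ===== LEMMAS AND PROOFS =====

-- big-endian decimal digit list of n, as Python's str renders it: digits of n, or [0] for n = 0
def dpad (n : Nat) : List Nat := if n = 0 then [0] else Nat.digits 10 n

-- grade-school column addition on little-endian digit lists: (result digits, final carry)
def colAdd : List Nat → List Nat → Nat → List Nat × Nat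
  | [], [], c => ([], c)
  | d :: ds, e :: es, c =>
      let l := d + e + c
      let r := colAdd ds es (l / 10)
      (l % 10 :: r.1, r.2)
  | d :: ds, [], c =>
      let l := d + c
      let r := colAdd ds [] (l / 10)
      (l % 10 :: r.1, r.2)
  | [], e :: es, c =>
      let l := e + c
      let r := colAdd [] es (l / 10)
      (l % 10 :: r.1, r.2)

def addDigits (ds es : List Nat) (c : Nat) : List Nat :=
  (colAdd ds es c).1 ++ (if (colAdd ds es c).2 = 1 then [1] else [])

def lastNZ (l : List Nat) : Prop := ∀ h : l ≠ [], l.getLast h ≠ 0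

theorem pyIntChar_digitChar (d : Nat) (hd : d < 10) : pyIntChar (Nat.digitChar d) = (d : Int) := by
  interval_cases d <;> decide

-- str(l % 10): a one-digit decimal string
def sstr (d : Nat) : String := String.ofList [Nat.digitChar d]

theorem toStr_digit (d : Nat) (hd : d < 10) :
    PySem.Int.toStr ((d : Int)) = sstr d := by
  interval_cases d <;> decide

theorem toDigitsCore_eq (fuel : Nat) : ∀ (n : Nat) (ds : List Char), n < fuel →
    Nat.toDigitsCore 10 fuel n ds = ((dpad n).map Nat.digitChar).reverse ++ ds := by
  induction fuel with
  | zero => intro n ds h; omega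
  | succ f ih =>
      intro n ds h
      rw [Nat.toDigitsCore]
      by_cases h0 : n / 10 = 0
      · simp only [h0]
        by_cases hn : n = 0
        · subst hn; simp [dpad]
        · have : Nat.digits 10 n = [n % 10] := by
            rw [Nat.digits_def' (by norm_num) (Nat.pos_of_ne_zero hn), h0]; simp
          simp [dpad, hn, this]
      · simp only [if_neg h0]
        rw [ih (n / 10) _ (by omega)]
        have hn : n ≠ 0 := by omega
        have : Nat.digits 10 n = n % 10 :: Nat.digits 10 (n / 10) := by
          exact Nat.digits_def' (by norm_num) (Nat.pos_of_ne_zero hn)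
        simp [dpad, hn, h0, this]

theorem toChars_nonneg (e : Int) (he : 0 ≤ e) :
    PySem.Int.toChars e = ((dpad e.toNat).map Nat.digitChar).reverse := by
  rw [PySem.Int.toChars]
  rw [if_neg (by omega)]
  rw [Nat.toDigits]
  rw [toDigitsCore_eq (e.toNat + 1) e.toNat [] (by omega)]
  simp

theorem ofDigits_pos (l : List Nat) (hne : l ≠ []) (hnz : lastNZ l) :
    0 < Nat.ofDigits 10 l := by
  induction l with
  | nil => exact absurd rfl hne
  | cons d l ih =>
      by_cases hl : l = []
      · subst hl
        have := hnz (by simp)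
        simp only [List.getLast_singleton] at this
        simp [Nat.ofDigits_cons]
        omega
      · have : 0 < Nat.ofDigits 10 l := by
          apply ih hl
          intro h
          have := hnz (by simp)
          rwa [List.getLast_cons h] at this
        simp [Nat.ofDigits_cons]
        omega

theorem lastNZ_tail (d : Nat) (l : List Nat) (h : lastNZ (d :: l)) : lastNZ l := by
  intro hne
  have := h (by simp)
  rwa [List.getLast_cons hne] at this

theorem colAdd_main : ∀ (ds es : List Nat) (c : Nat),
    (∀ d ∈ ds, d < 10) → (∀ d ∈ es, d < 10) → c ≤ 1 → lastNZ ds → lastNZ es →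
    addDigits ds es c = Nat.digits 10 (Nat.ofDigits 10 ds + Nat.ofDigits 10 es + c) := by
  intro ds
  induction ds with
  | nil =>
      intro es
      induction es with
      | nil =>
          intro c _ _ hc _ _
          interval_cases c <;> simp [addDigits, colAdd, Nat.ofDigits]
      | cons e es ih =>
          intro c _ hok hc _ hnz
          have he : e < 10 := hok e (by simp)
          have hpos : 0 < Nat.ofDigits 10 ([] : List Nat) + Nat.ofDigits 10 (e :: es) + c :=
            by have := ofDigits_pos (e :: es) (by simp) hnz; omega
          rw [Nat.digits_def' (b := 10) (by norm_num) hpos]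
          have hrec := ih ((e + c) / 10) (by simp) (fun d hd => hok d (by simp [hd]))
            (by omega) (by intro h; exact absurd rfl h) (lastNZ_tail e es hnz)
          simp only [addDigits, colAdd] at hrec ⊢
          rw [List.cons_append, hrec]
          congr 1
          · simp [Nat.ofDigits_cons]; omega
          · congr 1
            simp [Nat.ofDigits_cons]
            omega
  | cons d ds ihd =>
      intro es
      cases es with
      | nil =>
          intro c hok _ hc hnz _
          have hd : d < 10 := hok d (by simp)
          have hpos : 0 < Nat.ofDigits 10 (d :: ds) + Nat.ofDigits 10 ([] : List Nat) + c :=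
            by have := ofDigits_pos (d :: ds) (by simp) hnz; omega
          rw [Nat.digits_def' (b := 10) (by norm_num) hpos]
          have hrec := ihd [] ((d + c) / 10) (fun x hx => hok x (by simp [hx])) (by simp)
            (by omega) (lastNZ_tail d ds hnz) (by intro h; exact absurd rfl h)
          simp only [addDigits, colAdd] at hrec ⊢
          rw [List.cons_append, hrec]
          congr 1
          · simp [Nat.ofDigits_cons]; omega
          · congr 1
            simp [Nat.ofDigits_cons]
            omega
      | cons e es =>
          intro c hok1 hok2 hc hnz1 hnz2
          have hd : d < 10 := hok1 d (by simp)
          have he : e < 10 := hok2 e (by simp)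
          have hpos : 0 < Nat.ofDigits 10 (d :: ds) + Nat.ofDigits 10 (e :: es) + c :=
            by have := ofDigits_pos (d :: ds) (by simp) hnz1; omega
          rw [Nat.digits_def' (b := 10) (by norm_num) hpos]
          have hrec := ihd es ((d + e + c) / 10) (fun x hx => hok1 x (by simp [hx]))
            (fun x hx => hok2 x (by simp [hx])) (by omega)
            (lastNZ_tail d ds hnz1) (lastNZ_tail e es hnz2)
          simp only [addDigits, colAdd] at hrec ⊢
          rw [List.cons_append, hrec]
          congr 1
          · simp [Nat.ofDigits_cons]; omega
          · congr 1
            simp [Nat.ofDigits_cons]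
            omega

-- left operand is the padded zero ['0'] (only produced by x = 0), right operand canonical
theorem colAdd_zero_left (es : List Nat) (c : Nat) (hok : ∀ d ∈ es, d < 10) (hc : c ≤ 1)
    (hne : es ≠ []) (hnz : lastNZ es) :
    addDigits [0] es c = Nat.digits 10 (Nat.ofDigits 10 es + c) := by
  cases es with
  | nil => exact absurd rfl hne
  | cons e es =>
      have he : e < 10 := hok e (by simp)
      have hpos : 0 < Nat.ofDigits 10 (e :: es) + c :=
        by have := ofDigits_pos (e :: es) (by simp) hnz; omega
      rw [Nat.digits_def' (b := 10) (by norm_num) hpos]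
      have hrec := colAdd_main [] es ((0 + e + c) / 10) (by simp)
        (fun x hx => hok x (by simp [hx])) (by omega)
        (by intro h; exact absurd rfl h) (lastNZ_tail e es hnz)
      simp only [addDigits, colAdd] at hrec ⊢
      rw [List.cons_append, hrec]
      congr 1
      · simp [Nat.ofDigits_cons]; omega
      · congr 1
        simp [Nat.ofDigits_cons]
        omega

theorem colAdd_nil_comm : ∀ (es : List Nat) (c : Nat), colAdd [] es c = colAdd es [] c := by
  intro es
  induction es with
  | nil => intro c; rfl
  | cons e es ih => intro c; simp only [colAdd]; rw [ih]

theorem colAdd_comm : ∀ (ds es : List Nat) (c : Nat), colAdd ds es c = colAdd es ds c := by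
  intro ds
  induction ds with
  | nil => intro es c; exact colAdd_nil_comm es c
  | cons d ds ih =>
      intro es c
      cases es with
      | nil => exact (colAdd_nil_comm (d :: ds) c).symm
      | cons e es =>
          simp only [colAdd]
          rw [show d + e + c = e + d + c by omega, ih es]

theorem addDigits_comm (ds es : List Nat) (c : Nat) : addDigits ds es c = addDigits es ds c := by
  unfold addDigits; rw [colAdd_comm]

-- the key fact: column addition of the rendered digit lists gives the rendered digits of the sum
theorem addDigits_dpad (x y : Nat) : addDigits (dpad x) (dpad y) 0 = dpad (x + y) := by
  have h10 : (1:Nat) < 10 := by norm_num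
  have e0 : dpad 0 = [0] := rfl
  by_cases hx : x = 0
  · subst hx
    by_cases hy : y = 0
    · subst hy; simp [addDigits, colAdd, dpad]
    · have h := colAdd_zero_left (Nat.digits 10 y) 0
        (fun d hd => Nat.digits_lt_base h10 hd) (by omega)
        (by simp [Nat.digits_ne_nil_iff_ne_zero, hy])
        (fun hne => Nat.getLast_digit_ne_zero 10 hy)
      rw [Nat.ofDigits_digits, Nat.add_zero] at h
      have e2 : dpad y = Nat.digits 10 y := by unfold dpad; rw [if_neg hy]
      have e3 : dpad (0 + y) = Nat.digits 10 y := by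
        unfold dpad; rw [if_neg (by omega), Nat.zero_add]
      rw [e0, e2, e3]
      exact h
  · by_cases hy : y = 0
    · subst hy
      have h := colAdd_zero_left (Nat.digits 10 x) 0
        (fun d hd => Nat.digits_lt_base h10 hd) (by omega)
        (by simp [Nat.digits_ne_nil_iff_ne_zero, hx])
        (fun hne => Nat.getLast_digit_ne_zero 10 hx)
      rw [Nat.ofDigits_digits, Nat.add_zero] at h
      have e2 : dpad x = Nat.digits 10 x := by unfold dpad; rw [if_neg hx]
      have e3 : dpad (x + 0) = Nat.digits 10 x := by
        unfold dpad; rw [if_neg (by omega), Nat.add_zero]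
      rw [e0, e2, e3, addDigits_comm]
      exact h
    · have h := colAdd_main (Nat.digits 10 x) (Nat.digits 10 y) 0
        (fun d hd => Nat.digits_lt_base h10 hd) (fun d hd => Nat.digits_lt_base h10 hd)
        (by omega)
        (fun hne => Nat.getLast_digit_ne_zero 10 hx)
        (fun hne => Nat.getLast_digit_ne_zero 10 hy)
      rw [Nat.ofDigits_digits, Nat.ofDigits_digits, Nat.add_zero] at h
      have e1 : dpad x = Nat.digits 10 x := by unfold dpad; rw [if_neg hx]
      have e2 : dpad y = Nat.digits 10 y := by unfold dpad; rw [if_neg hy]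
      have e3 : dpad (x + y) = Nat.digits 10 (x + y) := by
        unfold dpad; rw [if_neg (by omega)]
      rw [e1, e2, e3]
      exact h

theorem yeLoop_eq : ∀ (ds es : List Nat) (c : Nat) (acc : List String),
    (∀ d ∈ ds, d < 10) → (∀ d ∈ es, d < 10) → c ≤ 1 →
    yeLoop (ds.map Nat.digitChar) (es.map Nat.digitChar) (c : Int) acc
      = (acc ++ ((colAdd ds es c).1.map sstr), ((colAdd ds es c).2 : Int)) := by
  intro ds
  induction ds with
  | nil =>
      intro es
      induction es with
      | nil => intro c acc _ _ _; simp [yeLoop, colAdd]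
      | cons e es ih =>
          intro c acc _ hok hc
          have he : e < 10 := hok e (by simp)
          simp only [List.map_cons, List.map_nil, yeLoop, colAdd]
          rw [pyIntChar_digitChar e he]
          have hl : (0 : Int) + (e : Int) + (c : Int) = ((e + c : Nat) : Int) := by push_cast; ring
          rw [hl]
          have hmod : PySem.Int.mod ((e + c : Nat) : Int) 10 = (((e + c) % 10 : Nat) : Int) := by
            exact_mod_cast PySem.Int.mod_natCast (e + c) 10
          rw [hmod, toStr_digit ((e + c) % 10) (by omega)]
          have hcarry : (if ((e + c : Nat) : Int) ≥ 10 then (1:Int) else 0) = (((e + c) / 10 : Nat) : Int) := by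
            by_cases h : e + c ≥ 10
            · rw [if_pos (by exact_mod_cast h)]
              have : (e + c) / 10 = 1 := by omega
              rw [this]; rfl
            · rw [if_neg (by push_cast; omega)]
              have : (e + c) / 10 = 0 := by omega
              rw [this]; rfl
          rw [hcarry]
          have := ih ((e + c) / 10) (acc ++ [sstr ((e + c) % 10)]) (by simp)
            (fun x hx => hok x (by simp [hx])) (by omega)
          simp only [List.map_nil] at this
          rw [this]
          simp [sstr]
  | cons d ds ihd =>
      intro es
      cases es with
      | nil =>
          intro c acc hok _ hc
          have hd : d < 10 := hok d (by simp)
          simp only [List.map_cons, List.map_nil, yeLoop, colAdd]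
          rw [pyIntChar_digitChar d hd]
          have hl : (d : Int) + 0 + (c : Int) = ((d + c : Nat) : Int) := by push_cast; ring
          rw [hl]
          have hmod : PySem.Int.mod ((d + c : Nat) : Int) 10 = (((d + c) % 10 : Nat) : Int) := by
            exact_mod_cast PySem.Int.mod_natCast (d + c) 10
          rw [hmod, toStr_digit ((d + c) % 10) (by omega)]
          have hcarry : (if ((d + c : Nat) : Int) ≥ 10 then (1:Int) else 0) = (((d + c) / 10 : Nat) : Int) := by
            by_cases h : d + c ≥ 10
            · rw [if_pos (by exact_mod_cast h)]
              have : (d + c) / 10 = 1 := by omega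
              rw [this]; rfl
            · rw [if_neg (by push_cast; omega)]
              have : (d + c) / 10 = 0 := by omega
              rw [this]; rfl
          rw [hcarry]
          have := ihd [] ((d + c) / 10) (acc ++ [sstr ((d + c) % 10)])
            (fun x hx => hok x (by simp [hx])) (by simp) (by omega)
          simp only [List.map_nil] at this
          rw [this]
          simp [sstr]
      | cons e es =>
          intro c acc hok1 hok2 hc
          have hd : d < 10 := hok1 d (by simp)
          have he : e < 10 := hok2 e (by simp)
          simp only [List.map_cons, yeLoop, colAdd]
          rw [pyIntChar_digitChar d hd, pyIntChar_digitChar e he]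
          have hl : (d : Int) + (e : Int) + (c : Int) = ((d + e + c : Nat) : Int) := by push_cast; ring
          rw [hl]
          have hmod : PySem.Int.mod ((d + e + c : Nat) : Int) 10 = (((d + e + c) % 10 : Nat) : Int) := by
            exact_mod_cast PySem.Int.mod_natCast (d + e + c) 10
          rw [hmod, toStr_digit ((d + e + c) % 10) (by omega)]
          have hcarry : (if ((d + e + c : Nat) : Int) ≥ 10 then (1:Int) else 0) = (((d + e + c) / 10 : Nat) : Int) := by
            by_cases h : d + e + c ≥ 10
            · rw [if_pos (by exact_mod_cast h)]
              have : (d + e + c) / 10 = 1 := by omega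
              rw [this]; rfl
            · rw [if_neg (by push_cast; omega)]
              have : (d + e + c) / 10 = 0 := by omega
              rw [this]; rfl
          rw [hcarry]
          have := ihd es ((d + e + c) / 10) (acc ++ [sstr ((d + e + c) % 10)])
            (fun x hx => hok1 x (by simp [hx])) (fun x hx => hok2 x (by simp [hx])) (by omega)
          rw [this]
          simp [sstr]

theorem hornerChars_eq : ∀ (bs : List Nat) (v : Int), (∀ d ∈ bs, d < 10) →
    hornerChars (bs.map Nat.digitChar) v
      = v * (10 : Int) ^ bs.length + ((Nat.ofDigits 10 bs.reverse : Nat) : Int) := by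
  intro bs
  induction bs with
  | nil => intro v _; simp [hornerChars, Nat.ofDigits_nil]
  | cons b bs ih =>
      intro v hok
      have hb : b < 10 := hok b (by simp)
      simp only [List.map_cons, hornerChars]
      rw [pyIntChar_digitChar b hb, ih _ (fun x hx => hok x (by simp [hx]))]
      have h2 : (Nat.ofDigits 10 ((b :: bs).reverse) : Nat)
          = Nat.ofDigits 10 bs.reverse + 10 ^ bs.length * b := by
        rw [List.reverse_cons, Nat.ofDigits_append]
        simp [Nat.ofDigits_singleton]
      rw [List.length_cons]
      push_cast [h2]
      ring

theorem dpad_lt (n : Nat) : ∀ d ∈ dpad n, d < 10 := by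
  intro d hd
  unfold dpad at hd
  by_cases h : n = 0
  · simp [h] at hd; omega
  · rw [if_neg h] at hd
    exact Nat.digits_lt_base (by norm_num) hd

theorem ofDigits_dpad (n : Nat) : Nat.ofDigits 10 (dpad n) = n := by
  unfold dpad
  by_cases h : n = 0
  · simp [h]
  · rw [if_neg h, Nat.ofDigits_digits]

theorem toList_toStr_nonneg (e : Int) (he : 0 ≤ e) :
    (PySem.Int.toStr e).toList = ((dpad e.toNat).reverse).map Nat.digitChar := by
  rw [PySem.Int.toList_toStr, toChars_nonneg e he, List.map_reverse]

theorem ye_alt_eq (e t : Int) (he : 0 ≤ e) (ht : 0 ≤ t) :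
    ye_alt e t = PySem.Int.toStr (e + t) := by
  unfold ye_alt
  rw [toList_toStr_nonneg e he, toList_toStr_nonneg t ht]
  rw [hornerChars_eq _ 0 (by intro d hd; exact dpad_lt _ d (List.mem_reverse.mp hd))]
  rw [hornerChars_eq _ 0 (by intro d hd; exact dpad_lt _ d (List.mem_reverse.mp hd))]
  simp only [List.reverse_reverse, ofDigits_dpad, zero_mul, zero_add]
  congr 1
  omega

theorem ye_eq (e t : Int) (he : 0 ≤ e) (ht : 0 ≤ t) :
    ye e t = PySem.Int.toStr (e + t) := by
  unfold ye
  rw [toList_toStr_nonneg e he, toList_toStr_nonneg t ht]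
  simp only [List.map_reverse, List.reverse_reverse]
  rw [show (0 : Int) = ((0 : Nat) : Int) by rfl]
  rw [yeLoop_eq (dpad e.toNat) (dpad t.toNat) 0 [] (dpad_lt _) (dpad_lt _) (by omega)]
  simp only [List.nil_append]
  have hjoin : ∀ L : List Nat,
      PySem.Str.join "" (L.map sstr).reverse = String.ofList ((L.map Nat.digitChar).reverse) := by
    intro L
    unfold PySem.Str.join
    congr 1
    have : (L.map sstr).reverse.map String.toList
        = ((L.map Nat.digitChar).reverse).map (fun c => [c]) := by
      simp only [← List.map_reverse, List.map_map]
      congr 1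
      funext d
      simp [sstr]
    rw [this]
    have := PySem.Chars.join_nil_singletons ((L.map Nat.digitChar).reverse)
    simpa using this
  by_cases hc : (colAdd (dpad e.toNat) (dpad t.toNat) 0).2 = 1
  · rw [if_pos (by simp [hc])]
    have h1 : ("1" : String) = sstr 1 := by decide
    rw [h1, show (colAdd (dpad e.toNat) (dpad t.toNat) 0).1.map sstr ++ [sstr 1]
        = (addDigits (dpad e.toNat) (dpad t.toNat) 0).map sstr by
      unfold addDigits; rw [if_pos hc]; simp]
    rw [hjoin]
    rw [addDigits_dpad]
    rw [PySem.Int.toStr]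
    rw [toChars_nonneg (e + t) (by omega), show (e + t).toNat = e.toNat + t.toNat by omega]
  · rw [if_neg (by simpa using fun h => hc (by exact_mod_cast h))]
    rw [show (colAdd (dpad e.toNat) (dpad t.toNat) 0).1.map sstr
        = (addDigits (dpad e.toNat) (dpad t.toNat) 0).map sstr by
      unfold addDigits; rw [if_neg hc]; simp]
    rw [hjoin]
    rw [addDigits_dpad]
    rw [PySem.Int.toStr]
    rw [toChars_nonneg (e + t) (by omega), show (e + t).toNat = e.toNat + t.toNat by omega]

-- ===== VERDICT (by name: the statement is the Claim_ definition above) =====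
theorem ye_spec : Claim_equal_ye := by
  intro e t _ hpre
  unfold Spec_ye
  rw [ye_eq e t hpre.1 hpre.2, ye_alt_eq e t hpre.1 hpre.2]
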